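-- pv_equiv track=rewrite | github.com/sebslig/Agent-Skills-Hub | skills/web-database-validator/scripts/database_validator.py | evaluate_checks
-- ===== SOURCE A (Python) =====
-- from typing import Any
--
-- def evaluate_checks(schema: dict[str, Any]) -> list[dict[str, Any]]:
--     tables = schema.get("tables", []) if isinstance(schema.get("tables"), list) else []
--     has_tables = bool(tables)
--     fk_count = 0
--     indexed_fk_count = 0
--     soft_delete_tables = 0
--     timestamp_tables = 0
--
--     for table in tables:
--         if not isinstance(table, dict):
--             continue
--         columns = table.get("columns", []) if isinstance(table.get("columns"), list) else []
--         indexes = set(table.get("indexes", [])) if isinstance(table.get("indexes"), list) else set()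
--         if "deleted_at" in columns:
--             soft_delete_tables += 1
--         if "created_at" in columns and "updated_at" in columns:
--             timestamp_tables += 1
--         for fk in table.get("foreign_keys", []) if isinstance(table.get("foreign_keys"), list) else []:
--             fk_count += 1
--             if fk in indexes:
--                 indexed_fk_count += 1
--
--     checks = [
--         {
--             "check": "migrations_applied",
--             "status": "pass" if has_tables else "warning",
--             "detail": "Schema tables available for validation" if has_tables else "No schema snapshot provided",
--         },
--         {
--             "check": "foreign_keys_defined",
--             "status": "pass" if fk_count > 0 else "warning",
--             "detail": f"{fk_count} foreign key definitions found",
--         },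
--         {
--             "check": "indexes_on_foreign_keys",
--             "status": "pass" if fk_count == 0 or indexed_fk_count == fk_count else "fail",
--             "detail": f"{indexed_fk_count}/{fk_count} foreign keys indexed",
--         },
--         {
--             "check": "n_plus_one_risk",
--             "status": "pass" if has_tables else "warning",
--             "detail": "No obvious N+1 indicators in static schema snapshot",
--         },
--         {
--             "check": "soft_delete_support",
--             "status": "pass" if soft_delete_tables > 0 else "warning",
--             "detail": f"{soft_delete_tables} tables include deleted_at",
--         },
--         {
--             "check": "auto_timestamps",
--             "status": "pass" if has_tables and timestamp_tables == len(tables) else "warning",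
--             "detail": f"{timestamp_tables}/{len(tables) if tables else 0} tables include created_at and updated_at",
--         },
--         {
--             "check": "seed_data_plan",
--             "status": "pass",
--             "detail": "Seed strategy prepared with Faker.js/Faker for realistic fixtures",
--         },
--     ]
--     return checks
-- ===== SOURCE B (Python) =====
-- from typing import Any
--
--
-- def _table_events(table: Any) -> list:
--     if not isinstance(table, dict):
--         return []
--     columns = table.get("columns", []) if isinstance(table.get("columns"), list) else []
--     indexes = set(table.get("indexes", [])) if isinstance(table.get("indexes"), list) else set()
--     fks = table.get("foreign_keys", []) if isinstance(table.get("foreign_keys"), list) else []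
--     return (["soft"] * ("deleted_at" in columns)
--             + ["ts"] * ("created_at" in columns and "updated_at" in columns)
--             + ["fk"] * len(fks)
--             + ["ifk" for fk in fks if fk in indexes])
--
--
-- def evaluate_checks(schema: dict[str, Any]) -> list[dict[str, Any]]:
--     tables = schema.get("tables", []) if isinstance(schema.get("tables"), list) else []
--     events = [e for table in tables for e in _table_events(table)]
--     fk_count = events.count("fk")
--     indexed_fk_count = events.count("ifk")
--     soft_delete_tables = events.count("soft")
--     timestamp_tables = events.count("ts")
--     has_tables = bool(tables)
--     rows = [
--         ("migrations_applied", has_tables, "warning",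
--          "Schema tables available for validation" if has_tables else "No schema snapshot provided"),
--         ("foreign_keys_defined", fk_count > 0, "warning",
--          f"{fk_count} foreign key definitions found"),
--         ("indexes_on_foreign_keys", fk_count == 0 or indexed_fk_count == fk_count, "fail",
--          f"{indexed_fk_count}/{fk_count} foreign keys indexed"),
--         ("n_plus_one_risk", has_tables, "warning",
--          "No obvious N+1 indicators in static schema snapshot"),
--         ("soft_delete_support", soft_delete_tables > 0, "warning",
--          f"{soft_delete_tables} tables include deleted_at"),
--         ("auto_timestamps", has_tables and timestamp_tables == len(tables), "warning",
--          f"{timestamp_tables}/{len(tables) if tables else 0} tables include created_at and updated_at"),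
--         ("seed_data_plan", True, "warning",
--          "Seed strategy prepared with Faker.js/Faker for realistic fixtures"),
--     ]
--     return [{"check": name, "status": "pass" if ok else bad, "detail": detail}
--             for name, ok, bad, detail in rows]
-- ===== Notes on version B (the rewrite author's own statement) =====
-- stated objective: alternative
-- what changed: Instead of A's single loop threading four mutable counters, B flattens the schema into a tag event stream ('soft'/'ts'/'fk'/'ifk') per table, derives each aggregate as a count over that one stream, and builds the seven result dicts from a data-driven (name, ok, fail_status, detail) row table.
import Mathlib
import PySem

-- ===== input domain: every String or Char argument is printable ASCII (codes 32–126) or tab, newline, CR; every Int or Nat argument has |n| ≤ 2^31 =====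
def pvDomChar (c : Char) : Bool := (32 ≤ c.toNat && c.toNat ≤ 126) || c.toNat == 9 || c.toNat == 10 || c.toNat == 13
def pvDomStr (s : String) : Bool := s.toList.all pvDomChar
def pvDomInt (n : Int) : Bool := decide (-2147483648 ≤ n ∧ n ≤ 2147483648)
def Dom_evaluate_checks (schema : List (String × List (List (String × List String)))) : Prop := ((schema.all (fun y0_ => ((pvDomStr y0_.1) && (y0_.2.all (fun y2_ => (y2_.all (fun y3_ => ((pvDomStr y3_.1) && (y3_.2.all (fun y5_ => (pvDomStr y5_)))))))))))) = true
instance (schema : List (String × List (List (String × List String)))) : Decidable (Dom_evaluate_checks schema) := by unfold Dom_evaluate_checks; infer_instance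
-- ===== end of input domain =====

-- B replaces A's single stateful loop (four running counters) by flattening the
-- schema into a tag event stream, counting tags, and a data-driven row table; same cost.

-- ===== PORT A =====
-- A's single loop, threading the state (fk_count, indexed_fk_count, soft_delete_tables, timestamp_tables).
-- 'isinstance(table, dict)' / 'isinstance(…, list)' guards on present values always hold under the type convention.
def evaluate_checks (schema : List (String × List (List (String × List String)))) : List (List (String × String)) :=
  let tables := match PySem.Dict.get? (PySem.Dict.mk schema) "tables" with | some t => t | none => []
  let has_tables := !tables.isEmpty
  let s := tables.foldl (fun (st : Int × Int × Int × Int) table =>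
    let columns := match PySem.Dict.get? (PySem.Dict.mk table) "columns" with | some c => c | none => []
    let indexes : PySem.Set String :=
      PySem.Set.ofList (match PySem.Dict.get? (PySem.Dict.mk table) "indexes" with | some i => i | none => [])
    let st := if columns.contains "deleted_at" then (st.1, st.2.1, st.2.2.1 + 1, st.2.2.2) else st
    let st := if columns.contains "created_at" && columns.contains "updated_at" then
        (st.1, st.2.1, st.2.2.1, st.2.2.2 + 1) else st
    (match PySem.Dict.get? (PySem.Dict.mk table) "foreign_keys" with | some f => f | none => []).foldl
      (fun (st : Int × Int × Int × Int) fk =>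
        (st.1 + 1, if PySem.Set.contains indexes fk then st.2.1 + 1 else st.2.1, st.2.2.1, st.2.2.2))
      st) ((0 : Int), (0 : Int), (0 : Int), (0 : Int))
  let fk_count := s.1
  let indexed_fk_count := s.2.1
  let soft_delete_tables := s.2.2.1
  let timestamp_tables := s.2.2.2
  [ [("check", "migrations_applied"),
     ("status", if has_tables then "pass" else "warning"),
     ("detail", if has_tables then "Schema tables available for validation" else "No schema snapshot provided")],
    [("check", "foreign_keys_defined"),
     ("status", if fk_count > 0 then "pass" else "warning"),
     ("detail", PySem.Int.toStr fk_count ++ " foreign key definitions found")],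
    [("check", "indexes_on_foreign_keys"),
     ("status", if fk_count = 0 ∨ indexed_fk_count = fk_count then "pass" else "fail"),
     ("detail", PySem.Int.toStr indexed_fk_count ++ "/" ++ PySem.Int.toStr fk_count ++ " foreign keys indexed")],
    [("check", "n_plus_one_risk"),
     ("status", if has_tables then "pass" else "warning"),
     ("detail", "No obvious N+1 indicators in static schema snapshot")],
    [("check", "soft_delete_support"),
     ("status", if soft_delete_tables > 0 then "pass" else "warning"),
     ("detail", PySem.Int.toStr soft_delete_tables ++ " tables include deleted_at")],
    [("check", "auto_timestamps"),
     ("status", if has_tables && decide (timestamp_tables = (tables.length : Int)) then "pass" else "warning"),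
     ("detail", PySem.Int.toStr timestamp_tables ++ "/"
        ++ PySem.Int.toStr (if !tables.isEmpty then (tables.length : Int) else 0)
        ++ " tables include created_at and updated_at")],
    [("check", "seed_data_plan"),
     ("status", "pass"),
     ("detail", "Seed strategy prepared with Faker.js/Faker for realistic fixtures")] ]

-- ===== PORT B =====
-- table.get(k) defaulting to [] (the isinstance(list) guard always holds under the type convention)
def pvGetList (t : List (String × List String)) (k : String) : List String :=
  (PySem.Dict.get? (PySem.Dict.mk t) k).getD []

-- _table_events of Source B: the per-table tag stream
def pvTableEvents (t : List (String × List String)) : List String :=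
  let columns := pvGetList t "columns"
  let indexes : PySem.Set String := PySem.Set.ofList (pvGetList t "indexes")
  let fks := pvGetList t "foreign_keys"
  (if columns.contains "deleted_at" then ["soft"] else []) ++
  (if columns.contains "created_at" && columns.contains "updated_at" then ["ts"] else []) ++
  List.replicate fks.length "fk" ++
  (fks.filter (fun fk => PySem.Set.contains indexes fk)).map (fun _ => "ifk")

def evaluate_checks_alt (schema : List (String × List (List (String × List String)))) : List (List (String × String)) :=
  let tables := (PySem.Dict.get? (PySem.Dict.mk schema) "tables").getD []
  let events := tables.flatMap pvTableEvents
  let fk_count : Int := (PySem.List.count events "fk" : Int)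
  let indexed_fk_count : Int := (PySem.List.count events "ifk" : Int)
  let soft_delete_tables : Int := (PySem.List.count events "soft" : Int)
  let timestamp_tables : Int := (PySem.List.count events "ts" : Int)
  let has_tables := !tables.isEmpty
  let rows : List (String × Bool × String × String) :=
    [ ("migrations_applied", has_tables, "warning",
       if has_tables then "Schema tables available for validation" else "No schema snapshot provided"),
      ("foreign_keys_defined", decide (fk_count > 0), "warning",
       PySem.Int.toStr fk_count ++ " foreign key definitions found"),
      ("indexes_on_foreign_keys", decide (fk_count = 0 ∨ indexed_fk_count = fk_count), "fail",
       PySem.Int.toStr indexed_fk_count ++ "/" ++ PySem.Int.toStr fk_count ++ " foreign keys indexed"),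
      ("n_plus_one_risk", has_tables, "warning",
       "No obvious N+1 indicators in static schema snapshot"),
      ("soft_delete_support", decide (soft_delete_tables > 0), "warning",
       PySem.Int.toStr soft_delete_tables ++ " tables include deleted_at"),
      ("auto_timestamps", has_tables && decide (timestamp_tables = (tables.length : Int)), "warning",
       PySem.Int.toStr timestamp_tables ++ "/"
         ++ PySem.Int.toStr (if !tables.isEmpty then (tables.length : Int) else 0)
         ++ " tables include created_at and updated_at"),
      ("seed_data_plan", true, "warning",
       "Seed strategy prepared with Faker.js/Faker for realistic fixtures") ]
  rows.map (fun r => [("check", r.1), ("status", if r.2.1 then "pass" else r.2.2.1), ("detail", r.2.2.2)])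

-- ===== PRECONDITION & SPEC =====
def Spec_evaluate_checks (schema : List (String × List (List (String × List String)))) (out : List (List (String × String))) : Prop := out = evaluate_checks_alt schema
instance (schema : List (String × List (List (String × List String)))) (out : List (List (String × String))) : Decidable (Spec_evaluate_checks schema out) := by unfold Spec_evaluate_checks; infer_instance

-- ===== CLAIM =====
def Claim_equal_evaluate_checks : Prop := ∀ (schema : List (String × List (List (String × List String)))), Dom_evaluate_checks schema → Spec_evaluate_checks schema (evaluate_checks schema)

-- ===== LEMMAS AND PROOFS =====

-- membership in set(indexes) = membership in the raw indexes list
theorem pv_contains_ofList (l : List String) (x : String) :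
    PySem.Set.contains (PySem.Set.ofList l) x = l.contains x := by
  by_cases h : x ∈ l
  · simp [PySem.Set.contains_eq_listContains, PySem.Set.mem_ofList, h]
  · simp [PySem.Set.contains_eq_listContains, PySem.Set.mem_ofList, h]

-- counting a tag in a constant-mapped list
theorem pv_count_map_const (l : List String) (s x : String) :
    ((l.map (fun _ => s)).count x) = if x = s then l.length else 0 := by
  by_cases h : x = s
  · subst h; simp
  · simp [List.count_replicate, h, Ne.symm h]

-- counts of the four tags in one table's event stream
theorem pv_count_events (t : List (String × List String)) :
    ((pvTableEvents t).count "fk" = (pvGetList t "foreign_keys").length)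
  ∧ ((pvTableEvents t).count "ifk"
      = ((pvGetList t "foreign_keys").filter
          (fun fk => (pvGetList t "indexes").contains fk)).length)
  ∧ ((pvTableEvents t).count "soft"
      = if (pvGetList t "columns").contains "deleted_at" then 1 else 0)
  ∧ ((pvTableEvents t).count "ts"
      = if (pvGetList t "columns").contains "created_at" && (pvGetList t "columns").contains "updated_at"
        then 1 else 0) := by
  unfold pvTableEvents
  simp only [List.count_append, pv_count_map_const, List.count_replicate]
  cases h1 : (pvGetList t "columns").contains "deleted_at" <;>
  cases h2 : (pvGetList t "columns").contains "created_at" && (pvGetList t "columns").contains "updated_at" <;>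
    simp

-- A's inner foreign-key loop adds len(fks) and the per-table indexed count to the first two components
theorem pv_inner_fold (idx : List String) (fks : List String) (st : Int × Int × Int × Int) :
    fks.foldl (fun (st : Int × Int × Int × Int) fk =>
        (st.1 + 1, if PySem.Set.contains (PySem.Set.ofList idx) fk then st.2.1 + 1 else st.2.1,
         st.2.2.1, st.2.2.2)) st
      = (st.1 + (fks.length : Int),
         st.2.1 + ((fks.filter (fun fk => idx.contains fk)).length : Int), st.2.2.1, st.2.2.2) := by
  induction fks generalizing st with
  | nil => simp
  | cons fk rest ih =>
    simp only [List.foldl_cons, List.filter_cons]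
    rw [pv_contains_ofList]
    cases hc : idx.contains fk with
    | true =>
      simp only [if_true, List.length_cons]
      rw [ih]
      simp only [Prod.ext_iff]
      push_cast
      and_intros <;> first | trivial | ring
    | false =>
      simp only [Bool.false_eq_true, if_false, List.length_cons]
      rw [ih]
      simp only [Prod.ext_iff]
      push_cast
      and_intros <;> first | trivial | ring

-- the 'v if present else []' match equals pvGetList
theorem pv_match_getList (t : List (String × List String)) (k : String) :
    (match PySem.Dict.get? (PySem.Dict.mk t) k with | some v => v | none => []) = pvGetList t k := by
  unfold pvGetList
  cases PySem.Dict.get? (PySem.Dict.mk t) k <;> rfl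

-- A's outer loop computes exactly the four tag counts of B's flattened event stream
theorem pv_outer_fold (ts : List (List (String × List String))) (a b c d : Int) :
    ts.foldl (fun (st : Int × Int × Int × Int) table =>
      let columns := match PySem.Dict.get? (PySem.Dict.mk table) "columns" with | some c => c | none => []
      let indexes : PySem.Set String :=
        PySem.Set.ofList (match PySem.Dict.get? (PySem.Dict.mk table) "indexes" with | some i => i | none => [])
      let st := if columns.contains "deleted_at" then (st.1, st.2.1, st.2.2.1 + 1, st.2.2.2) else st
      let st := if columns.contains "created_at" && columns.contains "updated_at" then
          (st.1, st.2.1, st.2.2.1, st.2.2.2 + 1) else st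
      (match PySem.Dict.get? (PySem.Dict.mk table) "foreign_keys" with | some f => f | none => []).foldl
        (fun (st : Int × Int × Int × Int) fk =>
          (st.1 + 1, if PySem.Set.contains indexes fk then st.2.1 + 1 else st.2.1, st.2.2.1, st.2.2.2))
        st) (a, b, c, d)
    = (a + (((ts.flatMap pvTableEvents).count "fk" : Nat) : Int),
       b + (((ts.flatMap pvTableEvents).count "ifk" : Nat) : Int),
       c + (((ts.flatMap pvTableEvents).count "soft" : Nat) : Int),
       d + (((ts.flatMap pvTableEvents).count "ts" : Nat) : Int)) := by
  induction ts generalizing a b c d with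
  | nil => simp
  | cons t rest ih =>
    obtain ⟨hfk, hifk, hsoft, hts⟩ := pv_count_events t
    simp only [List.foldl_cons, List.flatMap_cons, List.count_append]
    rw [pv_match_getList t "columns", pv_match_getList t "indexes", pv_match_getList t "foreign_keys",
        pv_inner_fold]
    cases h1 : (pvGetList t "columns").contains "deleted_at" with
    | true =>
      cases h2 : (pvGetList t "columns").contains "created_at" && (pvGetList t "columns").contains "updated_at" with
      | true =>
        simp only [if_true]
        rw [ih]
        simp only [h1, h2, if_true] at hsoft hts
        simp only [Prod.ext_iff, hfk, hifk, hsoft, hts]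
        push_cast
        and_intros <;> ring
      | false =>
        simp only [Bool.false_eq_true, if_true, if_false]
        rw [ih]
        simp only [h1, h2, Bool.false_eq_true, if_true, if_false] at hsoft hts
        simp only [Prod.ext_iff, hfk, hifk, hsoft, hts]
        push_cast
        and_intros <;> ring
    | false =>
      cases h2 : (pvGetList t "columns").contains "created_at" && (pvGetList t "columns").contains "updated_at" with
      | true =>
        simp only [Bool.false_eq_true, if_true, if_false]
        rw [ih]
        simp only [h1, h2, Bool.false_eq_true, if_true, if_false] at hsoft hts
        simp only [Prod.ext_iff, hfk, hifk, hsoft, hts]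
        push_cast
        and_intros <;> ring
      | false =>
        simp only [Bool.false_eq_true, if_false]
        rw [ih]
        simp only [h1, h2, Bool.false_eq_true, if_false] at hsoft hts
        simp only [Prod.ext_iff, hfk, hifk, hsoft, hts]
        push_cast
        and_intros <;> ring

-- ===== VERDICT =====
theorem evaluate_checks_spec : Claim_equal_evaluate_checks := by
  intro schema _
  show evaluate_checks schema = evaluate_checks_alt schema
  simp only [evaluate_checks, evaluate_checks_alt, PySem.List.count_eq, List.map]
  rw [show (match PySem.Dict.get? (PySem.Dict.mk schema) "tables" with | some t => t | none => [])
      = (PySem.Dict.get? (PySem.Dict.mk schema) "tables").getD [] from by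
        cases PySem.Dict.get? (PySem.Dict.mk schema) "tables" <;> rfl]
  rw [pv_outer_fold]
  simp
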